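-- pv_equiv track=rewrite | github.com/piruty/atcoder | atcoder_beginner_contest/abc_ccc.py | execute
-- ===== SOURCE A (Python) =====
-- def execute(A):
--     # 両端のどちらかが最小
--     if A[0] == min(A) or A[-1] == min(A):
--         return abs(max(A) - min(A))
--
--     # 左右両方にmax Aが含まれるようになったら計算しなくて良い
--     max_a = max(A)
--     i_max_a = [i for i, a in enumerate(A) if a == max_a]
--     max_i = len(A)
--     if len(i_max_a) > 1:
--         if i_max_a[0] < len(A) - i_max_a[-1]:
--             # 左側から先に最大数が来る
--             max_i = i_max_a[0] + 1
--         else: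
--             # 右側から先に最大数が来る
--             max_i = i_max_a[-1] + 1
--     m = 0
--     for i in range(max_i - 1):
--         # from left
--         mt = abs(max(set(A[:i + 1])) - max(set(A[i + 1:])))
--         if m < mt:
--             m = mt
--         # from right
--         mt = abs(max(set(A[:- i - 1])) - max(set(A[- i:])))
--         if m < mt:
--             m = mt
--     return m
-- ===== SOURCE B (Python) =====
-- def execute(A):
--     # For any split, the side containing a global maximum has max == max(A),
--     # so the best |max(left) - max(right)| is obtained by isolating an
--     # endpoint: the answer is the closed form max(A) - min(A[0], A[-1]).
--     return max(A) - min(A[0], A[-1])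
-- ===== Notes on version B (the rewrite author's own statement) =====
-- stated objective: faster
-- what changed: Replaces the quadratic loop over split points (recomputing slice maxima per split) by the closed form 'max of A minus the smaller endpoint', valid because the optimal partition isolates one endpoint.
-- intended difference: When the minimum of A is interior, the maximum occurs at least twice with its first occurrence at one of the first two positions, and the last element is smaller than the first, A's early-terminated loop never examines a split isolating the last element and returns too small a value (zero, or max minus the first element), while B returns the intended maximum split difference (max minus the last element). — e.g. on execute([2, 5, 5, 0, 1]): A returns 3, B returns 4
import Mathlib
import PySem

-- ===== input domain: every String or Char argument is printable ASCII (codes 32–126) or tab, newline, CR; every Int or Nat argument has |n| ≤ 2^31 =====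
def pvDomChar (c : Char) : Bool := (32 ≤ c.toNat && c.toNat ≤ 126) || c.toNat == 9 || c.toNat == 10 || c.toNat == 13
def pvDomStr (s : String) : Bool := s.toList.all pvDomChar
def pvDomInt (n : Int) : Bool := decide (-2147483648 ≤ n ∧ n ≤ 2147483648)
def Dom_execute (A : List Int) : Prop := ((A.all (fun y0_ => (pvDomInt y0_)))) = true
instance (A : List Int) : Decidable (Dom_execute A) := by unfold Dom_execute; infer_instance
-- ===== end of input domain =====

-- B replaces A's quadratic scan over split points by the closed form max(A) - min(A[0], A[-1]);
-- on the D_execute corner (doubled maximum near the front, interior minimum, last element below the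
-- first) A's early-terminated loop misses the best split; B returns the intended maximum difference.


-- ===== PORT A =====
def execute (A : List Int) : Int :=
  let mn := (PySem.List.min? A (fun x => x)).getD 0
  -- if A[0] == min(A) or A[-1] == min(A): return abs(max(A) - min(A))
  if (PySem.List.pyGet? A 0).getD 0 = mn ∨ (PySem.List.pyGet? A (-1)).getD 0 = mn then
    |(PySem.List.max? A (fun x => x)).getD 0 - mn|
  else
    let max_a := (PySem.List.max? A (fun x => x)).getD 0
    let i_max_a : List Int :=
      ((PySem.List.enumerate A 0).filter (fun p => p.2 == max_a)).map (fun p => p.1)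
    let max_i : Int :=
      if 1 < i_max_a.length then
        if (PySem.List.pyGet? i_max_a 0).getD 0 < (A.length : Int) - (PySem.List.pyGet? i_max_a (-1)).getD 0 then
          (PySem.List.pyGet? i_max_a 0).getD 0 + 1
        else
          (PySem.List.pyGet? i_max_a (-1)).getD 0 + 1
      else (A.length : Int)
    (PySem.List.pyRange 0 (max_i - 1) 1).foldl (fun m i =>
      let mt := |(PySem.List.max? (PySem.Set.ofList (PySem.List.slice A none (some (i + 1)))) (fun x => x)).getD 0
                 - (PySem.List.max? (PySem.Set.ofList (PySem.List.slice A (some (i + 1)) none)) (fun x => x)).getD 0|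
      let m := if m < mt then mt else m
      let mt := |(PySem.List.max? (PySem.Set.ofList (PySem.List.slice A none (some (-i - 1)))) (fun x => x)).getD 0
                 - (PySem.List.max? (PySem.Set.ofList (PySem.List.slice A (some (-i)) none)) (fun x => x)).getD 0|
      if m < mt then mt else m) 0

-- ===== PORT B =====
def execute_alt (A : List Int) : Int :=
  (PySem.List.max? A (fun x => x)).getD 0
    - min ((PySem.List.pyGet? A 0).getD 0) ((PySem.List.pyGet? A (-1)).getD 0)

-- ===== PRECONDITION & SPEC =====
-- Pre_ excludes only the empty list, on which A raises IndexError (A[0]).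
def Pre_execute (A : List Int) : Prop := A ≠ []
instance (A : List Int) : Decidable (Pre_execute A) := by unfold Pre_execute; infer_instance
def pvWitness_execute : List Int := ([1, 2])

-- A returns the wrong value when the minimum is interior, the maximum occurs at least twice with
-- its first occurrence at one of the first two positions, and the last element is smaller than the
-- first: A's early-terminated loop stops before any split isolating the last element and returns
-- too small a value, while B returns the intended maximum split difference.
def D_execute (A : List Int) : Prop :=
  2 ≤ A.length ∧
  A.getLastD 0 ≠ (A.min?).getD 0 ∧
  A.getLastD 0 < A.headD 0 ∧
  2 ≤ A.count ((A.max?).getD 0) ∧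
  (A.headD 0 = (A.max?).getD 0 ∨ A.getD 1 0 = (A.max?).getD 0)
instance (A : List Int) : Decidable (D_execute A) := by unfold D_execute; infer_instance

def Spec_execute (A : List Int) (out : Int) : Prop := ¬ D_execute A → out = execute_alt A
instance (A : List Int) (out : Int) : Decidable (Spec_execute A out) := by unfold Spec_execute; infer_instance

def pvDiffWitness_execute : List Int := ([2, 5, 5, 0, 1])
def pvDiffWitnessOut_execute : Int × Int := (3, 4)

-- ===== CLAIM (what is proved, stated in full; the proofs are below) =====
def Claim_unchanged_execute : Prop := ∀ (A : List Int), Dom_execute A → Pre_execute A → Spec_execute A (execute A)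
def Claim_changed_execute : Prop := Dom_execute (pvDiffWitness_execute) ∧ Pre_execute (pvDiffWitness_execute) ∧ D_execute (pvDiffWitness_execute) ∧ execute (pvDiffWitness_execute) = pvDiffWitnessOut_execute.1 ∧ execute_alt (pvDiffWitness_execute) = pvDiffWitnessOut_execute.2 ∧ pvDiffWitnessOut_execute.1 ≠ pvDiffWitnessOut_execute.2
def Claim_exact_execute : Prop := ∀ (A : List Int), Dom_execute A → Pre_execute A → D_execute A → execute A ≠ execute_alt A

-- ===== LEMMAS AND PROOFS =====

-- abbreviations for the port's sub-expressions (proof-side only)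
def mvE (l : List Int) : Int := (PySem.List.max? l (fun x => x)).getD 0
def mnvE (l : List Int) : Int := (PySem.List.min? l (fun x => x)).getD 0
def idxsE (A : List Int) : List Int :=
  ((PySem.List.enumerate A 0).filter (fun p => p.2 == mvE A)).map (fun p => p.1)
def maxIxE (A : List Int) : Int :=
  if 1 < (idxsE A).length then
    if (PySem.List.pyGet? (idxsE A) 0).getD 0 < (A.length : Int) - (PySem.List.pyGet? (idxsE A) (-1)).getD 0 then
      (PySem.List.pyGet? (idxsE A) 0).getD 0 + 1
    else (PySem.List.pyGet? (idxsE A) (-1)).getD 0 + 1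
  else (A.length : Int)
def t1E (A : List Int) (i : Int) : Int :=
  |(PySem.List.max? (PySem.Set.ofList (PySem.List.slice A none (some (i + 1)))) (fun x => x)).getD 0
   - (PySem.List.max? (PySem.Set.ofList (PySem.List.slice A (some (i + 1)) none)) (fun x => x)).getD 0|
def t2E (A : List Int) (i : Int) : Int :=
  |(PySem.List.max? (PySem.Set.ofList (PySem.List.slice A none (some (-i - 1)))) (fun x => x)).getD 0
   - (PySem.List.max? (PySem.Set.ofList (PySem.List.slice A (some (-i)) none)) (fun x => x)).getD 0|
def loopE (A : List Int) (mi : Int) : Int :=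
  (PySem.List.pyRange 0 (mi - 1) 1).foldl (fun m i =>
    let mt := t1E A i
    let m := if m < mt then mt else m
    let mt := t2E A i
    if m < mt then mt else m) 0

lemma execute_eq (A : List Int) :
    execute A =
      if (PySem.List.pyGet? A 0).getD 0 = mnvE A ∨ (PySem.List.pyGet? A (-1)).getD 0 = mnvE A then
        |mvE A - mnvE A|
      else loopE A (maxIxE A) := rfl

lemma execute_alt_eq (A : List Int) :
    execute_alt A = mvE A - min ((PySem.List.pyGet? A 0).getD 0) ((PySem.List.pyGet? A (-1)).getD 0) := rfl

-- max/min value lemmas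
lemma mv_cons (x : Int) (t : List Int) : mvE (x :: t) = t.foldl max x := by
  simp [mvE, PySem.List.max?_id_cons]

lemma mn_cons (x : Int) (t : List Int) : mnvE (x :: t) = t.foldl min x := by
  simp [mnvE, PySem.List.min?_id_cons]

lemma le_mvE {l : List Int} {y : Int} (h : y ∈ l) : y ≤ mvE l := by
  cases l with
  | nil => simp at h
  | cons x t =>
    rw [mv_cons]
    rcases List.mem_cons.1 h with rfl | ht
    · exact (PySem.List.le_foldl_max t y).1
    · exact (PySem.List.le_foldl_max t x).2 y ht

lemma mnvE_le {l : List Int} {y : Int} (h : y ∈ l) : mnvE l ≤ y := by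
  cases l with
  | nil => simp at h
  | cons x t =>
    rw [mn_cons]
    rcases List.mem_cons.1 h with rfl | ht
    · exact (PySem.List.foldl_min_le t y).1
    · exact (PySem.List.foldl_min_le t x).2 y ht

lemma mvE_mem {l : List Int} (h : l ≠ []) : mvE l ∈ l := by
  cases l with
  | nil => exact absurd rfl h
  | cons x t =>
    rw [mv_cons]
    rcases PySem.List.foldl_max_mem t x with h1 | h1
    · rw [h1]; exact List.mem_cons_self
    · exact List.mem_cons_of_mem x h1

lemma mvE_eq {l : List Int} {u : Int} (hu : u ∈ l) (hub : ∀ y ∈ l, y ≤ u) : mvE l = u :=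
  le_antisymm (hub _ (mvE_mem (List.ne_nil_of_mem hu))) (le_mvE hu)

lemma mvE_set (l : List Int) : mvE (PySem.Set.ofList l) = mvE l := by
  cases l with
  | nil => rfl
  | cons x t =>
    apply mvE_eq
    · exact (PySem.Set.mem_ofList _ _).2 (mvE_mem (List.cons_ne_nil x t))
    · intro y hy
      exact le_mvE ((PySem.Set.mem_ofList _ _).1 hy)

-- generic lemmas about the loop body's fold
lemma foldB_init_le (t1 t2 : Int → Int) (r : List Int) (c : Int) :
    c ≤ r.foldl (fun m i =>
      let mt := t1 i
      let m := if m < mt then mt else m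
      let mt := t2 i
      if m < mt then mt else m) c := by
  induction r generalizing c with
  | nil => simp
  | cons j r ih =>
    simp only [List.foldl_cons]
    refine le_trans ?_ (ih _)
    dsimp only
    split_ifs <;> omega

lemma foldB_le (t1 t2 : Int → Int) (r : List Int) {T : Int}
    (h : ∀ i ∈ r, t1 i ≤ T ∧ t2 i ≤ T) :
    ∀ c, c ≤ T → r.foldl (fun m i =>
      let mt := t1 i
      let m := if m < mt then mt else m
      let mt := t2 i
      if m < mt then mt else m) c ≤ T := by
  induction r with
  | nil => intro c hc; simpa using hc
  | cons j r ih =>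
    intro c hc
    simp only [List.foldl_cons]
    refine ih (fun i hi => h i (List.mem_cons_of_mem j hi)) _ ?_
    have h1 := (h j List.mem_cons_self).1
    have h2 := (h j List.mem_cons_self).2
    split_ifs <;> omega

lemma foldB_ge (t1 t2 : Int → Int) (r : List Int) {i : Int} (hi : i ∈ r) :
    ∀ c, t1 i ≤ r.foldl (fun m i =>
      let mt := t1 i
      let m := if m < mt then mt else m
      let mt := t2 i
      if m < mt then mt else m) c ∧
    t2 i ≤ r.foldl (fun m i =>
      let mt := t1 i
      let m := if m < mt then mt else m
      let mt := t2 i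
      if m < mt then mt else m) c := by
  induction r with
  | nil => simp at hi
  | cons j r ih =>
    intro c
    rcases List.mem_cons.1 hi with rfl | hmem
    · simp only [List.foldl_cons]
      have hinit := foldB_init_le t1 t2 r
        (let mt := t1 i
         let m := if c < mt then mt else c
         let mt := t2 i
         if m < mt then mt else m)
      constructor <;>
        (refine le_trans ?_ hinit
         show _ ≤ (if (if c < t1 i then t1 i else c) < t2 i then t2 i
                   else (if c < t1 i then t1 i else c))
         split_ifs <;> omega)
    · exact ih hmem _

-- the index list
lemma mem_idxs {A : List Int} {j : Int} :
    j ∈ idxsE A ↔ ∃ (k : Nat) (hk : k < A.length), j = (k : Int) ∧ A[k] = mvE A := by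
  simp only [idxsE, List.mem_map, List.mem_filter, PySem.List.mem_enumerate_iff]
  constructor
  · rintro ⟨p, ⟨⟨k, hk, rfl⟩, hval⟩, rfl⟩
    exact ⟨k, hk, by simpa using (beq_iff_eq.1 hval)⟩
  · rintro ⟨k, hk, rfl, hval⟩
    exact ⟨((k : Int), A[k]), ⟨⟨k, hk, by simp⟩, by simpa using hval⟩, rfl⟩

lemma countP_enum (A : List Int) (M : Int) : ∀ s : Int,
    (PySem.List.enumerate A s).countP (fun p => p.2 == M) = A.count M := by
  induction A with
  | nil => intro s; simp [PySem.List.enumerate_nil]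
  | cons x t ih =>
    intro s
    simp only [PySem.List.enumerate_cons, List.countP_cons, List.count_cons, ih]

lemma len_idxs (A : List Int) : (idxsE A).length = A.count (mvE A) := by
  rw [idxsE, List.length_map, ← List.countP_eq_length_filter, countP_enum]

lemma pairwise_idxs (A : List Int) : (idxsE A).Pairwise (· < ·) := by
  rw [idxsE, List.pairwise_map]
  exact (PySem.List.pairwise_lt_enumerate A 0).filter _

-- any |max(prefix) - max(suffix-from-q)| is at most max(A) - min(ends)
lemma split_ub (a : Int) (l : List Int) (p q : Nat) (hp : 1 ≤ p) (hq : q + 1 ≤ (a :: l).length) :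
    |mvE ((a :: l).take p) - mvE ((a :: l).drop q)|
      ≤ mvE (a :: l) - min a ((a :: l).getLast (List.cons_ne_nil a l)) := by
  have hmem_a : a ∈ (a :: l).take p := by
    cases p with
    | zero => omega
    | succ p => rw [List.take_succ_cons]; exact List.mem_cons_self
  have hlast : (a :: l).getLast (List.cons_ne_nil a l) ∈ (a :: l).drop q := by
    have hlen : (a :: l).length - 1 - q < ((a :: l).drop q).length := by
      rw [List.length_drop]; omega
    have h3 : ((a :: l).drop q)[(a :: l).length - 1 - q]'hlen
        = (a :: l)[q + ((a :: l).length - 1 - q)]'(by omega) := List.getElem_drop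
    have h4 : (a :: l)[(a :: l).length - 1]'(by omega)
        = (a :: l)[q + ((a :: l).length - 1 - q)]'(by omega) :=
      getElem_congr rfl (by omega) _
    rw [List.getLast_eq_getElem, h4, ← h3]
    exact List.getElem_mem hlen
  have htne : (a :: l).take p ≠ [] := List.ne_nil_of_mem hmem_a
  have hdne : (a :: l).drop q ≠ [] := List.ne_nil_of_mem hlast
  have h1 : mvE ((a :: l).take p) ≤ mvE (a :: l) :=
    le_mvE (List.take_subset _ _ (mvE_mem htne))
  have h2 : mvE ((a :: l).drop q) ≤ mvE (a :: l) :=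
    le_mvE (List.drop_subset _ _ (mvE_mem hdne))
  have h3 : a ≤ mvE ((a :: l).take p) := le_mvE hmem_a
  have h4 : (a :: l).getLast (List.cons_ne_nil a l) ≤ mvE ((a :: l).drop q) := le_mvE hlast
  rw [abs_sub_le_iff]
  omega

-- term rewriting to take/drop form
lemma t1_eq (A : List Int) (i : Int) (h : 0 ≤ i) :
    t1E A i = |mvE (A.take (i + 1).toNat) - mvE (A.drop (i + 1).toNat)| := by
  rw [t1E, PySem.List.slice_to A (by omega), PySem.List.slice_from A (by omega)]
  rw [show (PySem.List.max? (PySem.Set.ofList (A.take (i+1).toNat)) (fun x => x)).getD 0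
        = mvE (PySem.Set.ofList (A.take (i+1).toNat)) from rfl]
  rw [show (PySem.List.max? (PySem.Set.ofList (A.drop (i+1).toNat)) (fun x => x)).getD 0
        = mvE (PySem.Set.ofList (A.drop (i+1).toNat)) from rfl]
  rw [mvE_set, mvE_set]

lemma t2_eq_zero (A : List Int) : t2E A 0 = |mvE (A.take (A.length - 1)) - mvE A| := by
  rw [t2E]
  rw [show (-(0:Int) - 1) = -1 by norm_num, show (-(0:Int)) = 0 by norm_num]
  rw [PySem.List.slice_to_neg_one, PySem.List.slice_zero_start, PySem.List.slice_none_none]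
  rw [List.dropLast_eq_take]
  rw [show (PySem.List.max? (PySem.Set.ofList (A.take (A.length - 1))) (fun x => x)).getD 0
        = mvE (PySem.Set.ofList (A.take (A.length - 1))) from rfl]
  rw [show (PySem.List.max? (PySem.Set.ofList A) (fun x => x)).getD 0
        = mvE (PySem.Set.ofList A) from rfl]
  rw [mvE_set, mvE_set]

lemma t2_eq (A : List Int) (i : Int) (h : 1 ≤ i) :
    t2E A i = |mvE (A.take (A.length - (i.toNat + 1))) - mvE (A.drop (A.length - i.toNat))| := by
  rw [t2E]
  rw [show (-i - 1) = -((i.toNat + 1 : Nat) : Int) by omega]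
  rw [show (-i) = -((i.toNat : Nat) : Int) by omega]
  rw [PySem.List.slice_to_neg_natCast A (i.toNat + 1) (by omega),
      PySem.List.slice_from_neg_natCast A i.toNat (by omega)]
  rw [show (PySem.List.max? (PySem.Set.ofList (A.take (A.length - (i.toNat + 1)))) (fun x => x)).getD 0
        = mvE (PySem.Set.ofList (A.take (A.length - (i.toNat + 1)))) from rfl]
  rw [show (PySem.List.max? (PySem.Set.ofList (A.drop (A.length - i.toNat))) (fun x => x)).getD 0
        = mvE (PySem.Set.ofList (A.drop (A.length - i.toNat))) from rfl]
  rw [mvE_set, mvE_set]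

lemma loop_nonneg (A : List Int) (mi : Int) : 0 ≤ loopE A mi :=
  foldB_init_le _ _ _ 0

lemma loop_ub (a : Int) (l : List Int) (mi : Int) (hmi : mi ≤ ((a :: l).length : Int))
    (hn2 : 2 ≤ (a :: l).length) :
    loopE (a :: l) mi ≤ mvE (a :: l) - min a ((a :: l).getLast (List.cons_ne_nil a l)) := by
  have hT : 0 ≤ mvE (a :: l) - min a ((a :: l).getLast (List.cons_ne_nil a l)) := by
    have hx := le_mvE (List.mem_cons_self (a := a) (l := l))
    have hy := le_mvE (List.getLast_mem (List.cons_ne_nil a l))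
    omega
  refine foldB_le _ _ _ ?_ 0 hT
  intro i hi
  rw [PySem.List.mem_pyRange_one] at hi
  have hi0 : 0 ≤ i := hi.1
  have hilt : i < mi - 1 := hi.2
  constructor
  · rw [t1_eq _ _ hi0]
    apply split_ub a l _ _ (by omega) (by omega)
  · by_cases h0 : i = 0
    · subst h0
      rw [t2_eq_zero]
      have := split_ub a l ((a :: l).length - 1) 0 (by omega) (by omega)
      rwa [List.drop_zero] at this
    · rw [t2_eq _ _ (by omega)]
      apply split_ub a l _ _ (by omega) (by omega)

lemma loop_ge (A : List Int) (mi i : Int) (hi0 : 0 ≤ i) (hilt : i < mi - 1) :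
    t1E A i ≤ loopE A mi ∧ t2E A i ≤ loopE A mi :=
  foldB_ge _ _ _ (by rw [PySem.List.mem_pyRange_one]; omega) 0

lemma loop_eq (a : Int) (l : List Int) (mi : Int) (hmi : mi ≤ ((a :: l).length : Int))
    (hn2 : 2 ≤ (a :: l).length)
    (hw : mvE (a :: l) - min a ((a :: l).getLast (List.cons_ne_nil a l)) = 0 ∨
      ∃ i, 0 ≤ i ∧ i < mi - 1 ∧
        (t1E (a :: l) i = mvE (a :: l) - min a ((a :: l).getLast (List.cons_ne_nil a l)) ∨
         t2E (a :: l) i = mvE (a :: l) - min a ((a :: l).getLast (List.cons_ne_nil a l)))) :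
    loopE (a :: l) mi = mvE (a :: l) - min a ((a :: l).getLast (List.cons_ne_nil a l)) := by
  have hub := loop_ub a l mi hmi hn2
  have hnn := loop_nonneg (a :: l) mi
  rcases hw with hw | ⟨i, hi0, hilt, hw⟩
  · omega
  · have hge := loop_ge (a :: l) mi i hi0 hilt
    rcases hw with hw | hw <;> omega

-- bridges between core functions in D_execute and the port-side expressions
lemma getLastD_cons (a d : Int) (l : List Int) :
    (a :: l).getLastD d = (a :: l).getLast (List.cons_ne_nil a l) := by
  rw [List.getLastD_eq_getLast?, List.getLast?_eq_some_getLast (List.cons_ne_nil a l)]; rfl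

lemma mv_bridge (a : Int) (l : List Int) : ((a :: l).max?).getD 0 = mvE (a :: l) := by
  rw [mv_cons]; simp [List.max?]

lemma mn_bridge (a : Int) (l : List Int) : ((a :: l).min?).getD 0 = mnvE (a :: l) := by
  rw [mn_cons]; simp [List.min?]

-- witness-term evaluations
lemma mvE_drop_last (a : Int) (l : List Int) :
    mvE ((a :: l).drop ((a :: l).length - 1)) = (a :: l).getLast (List.cons_ne_nil a l) := by
  rw [List.drop_length_sub_one (List.cons_ne_nil a l), mv_cons]; rfl

lemma mvE_take_of_M (a : Int) (l : List Int) (k p : Nat) (hk : k < p) (hkl : k < (a :: l).length)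
    (hval : (a :: l)[k] = mvE (a :: l)) : mvE ((a :: l).take p) = mvE (a :: l) := by
  apply mvE_eq
  · have h1 : ((a :: l).take p)[k]'(by rw [List.length_take]; omega) = (a :: l)[k] :=
      List.getElem_take
    rw [← hval, ← h1]
    exact List.getElem_mem _
  · intro y hy
    exact le_mvE (List.take_subset _ _ hy)

lemma wit_t1_zero (a : Int) (l : List Int) (hM : mvE (a :: l) ∈ l) :
    t1E (a :: l) 0 = mvE (a :: l) - a := by
  rw [t1_eq _ _ (by omega)]
  rw [show ((0 : Int) + 1).toNat = 1 from rfl]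
  rw [show (a :: l).take 1 = [a] from rfl, show (a :: l).drop 1 = l from rfl]
  have h1 : mvE [a] = a := by rw [mv_cons]; rfl
  have h2 : mvE l = mvE (a :: l) :=
    mvE_eq hM (fun y hy => le_mvE (List.mem_cons_of_mem a hy))
  have h3 : a ≤ mvE (a :: l) := le_mvE List.mem_cons_self
  rw [h1, h2, abs_sub_comm, abs_of_nonneg (by omega)]

lemma wit_t1_last (a : Int) (l : List Int) (hn2 : 2 ≤ (a :: l).length)
    (k : Nat) (hk : k < (a :: l).length - 1) (hval : (a :: l)[k]'(by omega) = mvE (a :: l)) :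
    t1E (a :: l) (((a :: l).length : Int) - 2)
      = mvE (a :: l) - (a :: l).getLast (List.cons_ne_nil a l) := by
  rw [t1_eq _ _ (by omega)]
  rw [show (((a :: l).length : Int) - 2 + 1).toNat = (a :: l).length - 1 by omega]
  rw [mvE_take_of_M a l k ((a :: l).length - 1) (by omega) (by omega) hval]
  rw [mvE_drop_last]
  have h1 : (a :: l).getLast (List.cons_ne_nil a l) ≤ mvE (a :: l) :=
    le_mvE (List.getLast_mem _)
  rw [abs_of_nonneg (by omega)]

lemma wit_t2_one (a : Int) (l : List Int) (hn2 : 2 ≤ (a :: l).length)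
    (k : Nat) (hk : k < (a :: l).length - 2) (hval : (a :: l)[k]'(by omega) = mvE (a :: l)) :
    t2E (a :: l) 1 = mvE (a :: l) - (a :: l).getLast (List.cons_ne_nil a l) := by
  rw [t2_eq _ _ (by omega)]
  rw [show ((1 : Int)).toNat = 1 from rfl]
  rw [mvE_take_of_M a l k ((a :: l).length - 2) (by omega) (by omega) hval]
  rw [mvE_drop_last]
  have h1 : (a :: l).getLast (List.cons_ne_nil a l) ≤ mvE (a :: l) :=
    le_mvE (List.getLast_mem _)
  rw [abs_of_nonneg (by omega)]

lemma idxs_head_lt_last (A : List Int) (j0 : Int) (rest : List Int) (hne : idxsE A ≠ [])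
    (hE : idxsE A = j0 :: rest) (hlen : 1 < (idxsE A).length) :
    j0 < (idxsE A).getLast hne := by
  have hrest : rest ≠ [] := by
    intro h; rw [hE, h] at hlen; simp at hlen
  have hpw := pairwise_idxs A
  rw [hE] at hpw
  have : (idxsE A).getLast hne = rest.getLast hrest := by
    conv_lhs => rw [show (idxsE A).getLast hne = (j0 :: rest).getLast (by simp) from by
      congr 1 <;> rw [hE]]
    exact List.getLast_cons hrest
  rw [this]
  exact (List.pairwise_cons.1 hpw).1 _ (List.getLast_mem hrest)

lemma le_or_lt_int (x y : Int) : x ≤ y ∨ y < x := by omega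

lemma main_eq (a : Int) (l : List Int) (hD : ¬ D_execute (a :: l)) :
    execute (a :: l) = execute_alt (a :: l) := by
  have hAne : (a :: l) ≠ [] := List.cons_ne_nil a l
  have hg0 : (PySem.List.pyGet? (a :: l) 0).getD 0 = a := by
    rw [PySem.List.pyGet?_zero_cons]; rfl
  have hgl : (PySem.List.pyGet? (a :: l) (-1)).getD 0 = (a :: l).getLast hAne := by
    rw [PySem.List.pyGet?_neg_one, List.getLast?_eq_some_getLast hAne]; rfl
  rw [execute_eq, execute_alt_eq, hg0, hgl]
  have hma : a ≤ mvE (a :: l) := le_mvE List.mem_cons_self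
  have hman : (a :: l).getLast hAne ≤ mvE (a :: l) := le_mvE (List.getLast_mem hAne)
  by_cases h1 : a = mnvE (a :: l) ∨ (a :: l).getLast hAne = mnvE (a :: l)
  · rw [if_pos h1]
    have hmn1 : mnvE (a :: l) ≤ a := mnvE_le List.mem_cons_self
    have hmn2 : mnvE (a :: l) ≤ (a :: l).getLast hAne := mnvE_le (List.getLast_mem hAne)
    rw [abs_of_nonneg (by omega)]
    rcases h1 with h1 | h1 <;> omega
  · rw [if_neg h1]
    push_neg at h1
    obtain ⟨hamn, hanmn⟩ := h1
    have hn2 : 2 ≤ (a :: l).length := by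
      cases l with
      | nil => exact absurd (by rw [mn_cons]; rfl) hamn
      | cons b t => simp
    have hMmem : mvE (a :: l) ∈ (a :: l) := mvE_mem hAne
    have hidx_ne : idxsE (a :: l) ≠ [] := by
      intro h
      have hc := len_idxs (a :: l)
      rw [h] at hc
      simp only [List.length_nil] at hc
      exact (List.count_eq_zero.1 hc.symm) hMmem
    obtain ⟨j0, rest, hE⟩ := List.exists_cons_of_ne_nil hidx_ne
    have hj0mem : j0 ∈ idxsE (a :: l) := by rw [hE]; exact List.mem_cons_self
    obtain ⟨k0, hk0lt, hj0k, hk0val⟩ := mem_idxs.1 hj0mem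
    have hjlmem : (idxsE (a :: l)).getLast hidx_ne ∈ idxsE (a :: l) := List.getLast_mem hidx_ne
    obtain ⟨kl, hkllt, hjlk, hklval⟩ := mem_idxs.1 hjlmem
    have hi0get : (PySem.List.pyGet? (idxsE (a :: l)) 0).getD 0 = (k0 : Int) := by
      rw [hE, PySem.List.pyGet?_zero_cons]
      exact hj0k
    have hilget : (PySem.List.pyGet? (idxsE (a :: l)) (-1)).getD 0 = (kl : Int) := by
      rw [PySem.List.pyGet?_neg_one, List.getLast?_eq_some_getLast hidx_ne]
      exact hjlk
    have hanval : (a :: l)[(a :: l).length - 1]'(by omega) = (a :: l).getLast hAne :=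
      (List.getLast_eq_getElem hAne).symm
    unfold maxIxE
    rw [hi0get, hilget]
    by_cases hT0 : mvE (a :: l) = min a ((a :: l).getLast hAne)
    · split_ifs with hlen1 hcmp
      · exact loop_eq a l _ (by omega) hn2 (Or.inl (by omega))
      · exact loop_eq a l _ (by omega) hn2 (Or.inl (by omega))
      · exact loop_eq a l _ (by omega) hn2 (Or.inl (by omega))
    · rcases le_or_lt_int a ((a :: l).getLast hAne) with hcmp0 | hcmp0
      · -- min(ends) is a; split at 1 realises the bound
        have haM : a < mvE (a :: l) := by
          rw [min_eq_left hcmp0] at hT0; omega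
        have hMl : mvE (a :: l) ∈ l := by
          rcases List.mem_cons.1 hMmem with h | h
          · omega
          · exact h
        have ht1 := wit_t1_zero a l hMl
        have hk0pos : 1 ≤ k0 := by
          by_contra h
          push_neg at h
          interval_cases k0
          simp at hk0val
          omega
        have hklpos : 1 ≤ kl := by
          by_contra h
          push_neg at h
          interval_cases kl
          simp at hklval
          omega
        split_ifs with hlen1 hcmp
        · exact loop_eq a l _ (by omega) hn2
            (Or.inr ⟨0, by omega, by omega, Or.inl (by rw [ht1, min_eq_left hcmp0])⟩)
        · exact loop_eq a l _ (by omega) hn2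
            (Or.inr ⟨0, by omega, by omega, Or.inl (by rw [ht1, min_eq_left hcmp0])⟩)
        · exact loop_eq a l _ (by omega) hn2
            (Or.inr ⟨0, by omega, by omega, Or.inl (by rw [ht1, min_eq_left hcmp0])⟩)
      · -- min(ends) is the last element
        have hanM : (a :: l).getLast hAne < mvE (a :: l) := by
          rw [min_eq_right (le_of_lt hcmp0)] at hT0; omega
        have hk0ne : k0 < (a :: l).length - 1 := by
          rcases Nat.lt_or_ge k0 ((a :: l).length - 1) with h | h
          · exact h
          · exfalso
            have he : (a :: l)[k0]'hk0lt = (a :: l)[(a :: l).length - 1]'(by omega) :=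
              getElem_congr rfl (by omega) _
            rw [he, hanval] at hk0val
            omega
        have hklne : kl < (a :: l).length - 1 := by
          rcases Nat.lt_or_ge kl ((a :: l).length - 1) with h | h
          · exact h
          · exfalso
            have he : (a :: l)[kl]'hkllt = (a :: l)[(a :: l).length - 1]'(by omega) :=
              getElem_congr rfl (by omega) _
            rw [he, hanval] at hklval
            omega
        have hDF : 1 < (idxsE (a :: l)).length → 2 ≤ k0 ∧ k0 < kl := by
          intro hlen1
          have hcnt : 2 ≤ (a :: l).count (mvE (a :: l)) := by
            rw [← len_idxs]; omega
          have hne5 : ¬((a :: l).headD 0 = ((a :: l).max?).getD 0 ∨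
              (a :: l).getD 1 0 = ((a :: l).max?).getD 0) := by
            intro h5
            exact hD ⟨hn2,
              by rw [getLastD_cons, mn_bridge]; exact hanmn,
              by rw [getLastD_cons]; exact hcmp0,
              by rw [mv_bridge]; exact hcnt, h5⟩
          push_neg at hne5
          obtain ⟨hne5a, hne5b⟩ := hne5
          rw [mv_bridge] at hne5a hne5b
          have hgd1 : (a :: l).getD 1 0 = (a :: l)[1]'(by omega) :=
            List.getD_eq_getElem _ _ (by omega)
          rw [hgd1] at hne5b
          have hk02 : 2 ≤ k0 := by
            by_contra h
            push_neg at h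
            interval_cases k0
            · simp only [List.getElem_cons_zero] at hk0val
              exact hne5a hk0val
            · exact hne5b (by
                have he : (a :: l)[1]'(by omega) = (a :: l)[1]'hk0lt := rfl
                rw [he]; exact hk0val)
          have hk0kl : k0 < kl := by
            have hlt := idxs_head_lt_last (a :: l) j0 rest hidx_ne hE hlen1
            rw [hj0k, hjlk] at hlt
            exact_mod_cast hlt
          exact ⟨hk02, hk0kl⟩
        split_ifs with hlen1 hcmp
        · obtain ⟨hk02, hk0kl⟩ := hDF hlen1
          have hk0n3 : k0 < (a :: l).length - 2 := by omega
          exact loop_eq a l _ (by omega) hn2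
            (Or.inr ⟨1, by omega, by omega, Or.inr (by
              rw [wit_t2_one a l hn2 k0 hk0n3 hk0val, min_eq_right (le_of_lt hcmp0)])⟩)
        · obtain ⟨hk02, hk0kl⟩ := hDF hlen1
          have hk0n3 : k0 < (a :: l).length - 2 := by omega
          exact loop_eq a l _ (by omega) hn2
            (Or.inr ⟨1, by omega, by omega, Or.inr (by
              rw [wit_t2_one a l hn2 k0 hk0n3 hk0val, min_eq_right (le_of_lt hcmp0)])⟩)
        · exact loop_eq a l _ (by omega) hn2
            (Or.inr ⟨((a :: l).length : Int) - 2, by omega, by omega, Or.inl (by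
              rw [wit_t1_last a l hn2 k0 hk0ne hk0val, min_eq_right (le_of_lt hcmp0)])⟩)

lemma idxs_head_le (A : List Int) (j0 : Int) (rest : List Int)
    (hE : idxsE A = j0 :: rest) : ∀ x ∈ idxsE A, j0 ≤ x := by
  intro x hx
  have hpw := pairwise_idxs A
  rw [hE] at hpw hx
  rcases List.mem_cons.1 hx with rfl | hx
  · exact le_refl x
  · exact le_of_lt ((List.pairwise_cons.1 hpw).1 x hx)

-- inside D_execute the loop of A is cut short and stays strictly below B's value
lemma main_ne (a : Int) (l : List Int) (hDin : D_execute (a :: l)) :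
    execute (a :: l) ≠ execute_alt (a :: l) := by
  obtain ⟨c1, c2, c3, c4, c5⟩ := hDin
  rw [getLastD_cons] at c2 c3
  rw [mn_bridge] at c2
  rw [mv_bridge] at c4 c5
  have hAne : (a :: l) ≠ [] := List.cons_ne_nil a l
  have hca : (a :: l).getLast (List.cons_ne_nil a l) < a := c3
  have hg0 : (PySem.List.pyGet? (a :: l) 0).getD 0 = a := by
    rw [PySem.List.pyGet?_zero_cons]; rfl
  have hgl : (PySem.List.pyGet? (a :: l) (-1)).getD 0 = (a :: l).getLast hAne := by
    rw [PySem.List.pyGet?_neg_one, List.getLast?_eq_some_getLast hAne]; rfl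
  have hma : a ≤ mvE (a :: l) := le_mvE List.mem_cons_self
  have hman : (a :: l).getLast hAne ≤ mvE (a :: l) := le_mvE (List.getLast_mem hAne)
  have hmnan : mnvE (a :: l) ≤ (a :: l).getLast hAne := mnvE_le (List.getLast_mem hAne)
  have hanval : (a :: l)[(a :: l).length - 1]'(by omega) = (a :: l).getLast hAne :=
    (List.getLast_eq_getElem hAne).symm
  -- A takes the loop branch
  rw [execute_eq, execute_alt_eq, hg0, hgl, if_neg (by
    rintro (h | h) <;> omega)]
  -- index-list facts
  have hMmem : mvE (a :: l) ∈ (a :: l) := mvE_mem hAne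
  have hidx_ne : idxsE (a :: l) ≠ [] := by
    intro h
    have hc := len_idxs (a :: l)
    rw [h] at hc
    simp only [List.length_nil] at hc
    exact (List.count_eq_zero.1 hc.symm) hMmem
  obtain ⟨j0, rest, hE⟩ := List.exists_cons_of_ne_nil hidx_ne
  have hj0mem : j0 ∈ idxsE (a :: l) := by rw [hE]; exact List.mem_cons_self
  obtain ⟨k0, hk0lt, hj0k, hk0val⟩ := mem_idxs.1 hj0mem
  have hjlmem : (idxsE (a :: l)).getLast hidx_ne ∈ idxsE (a :: l) := List.getLast_mem hidx_ne
  obtain ⟨kl, hkllt, hjlk, hklval⟩ := mem_idxs.1 hjlmem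
  have hi0get : (PySem.List.pyGet? (idxsE (a :: l)) 0).getD 0 = (k0 : Int) := by
    rw [hE, PySem.List.pyGet?_zero_cons]
    exact hj0k
  have hilget : (PySem.List.pyGet? (idxsE (a :: l)) (-1)).getD 0 = (kl : Int) := by
    rw [PySem.List.pyGet?_neg_one, List.getLast?_eq_some_getLast hidx_ne]
    exact hjlk
  have hlen1 : 1 < (idxsE (a :: l)).length := by
    rw [len_idxs]; omega
  have hanM : (a :: l).getLast hAne < mvE (a :: l) := by omega
  -- the head index is at most 1
  have hk01 : k0 ≤ 1 := by
    rcases c5 with c5 | c5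
    · have h0 : (0 : Int) ∈ idxsE (a :: l) :=
        mem_idxs.2 ⟨0, by omega, rfl, by simpa using c5⟩
      have := idxs_head_le (a :: l) j0 rest hE 0 h0
      rw [hj0k] at this
      omega
    · rw [List.getD_eq_getElem _ _ (by omega : 1 < (a :: l).length)] at c5
      have h0 : (1 : Int) ∈ idxsE (a :: l) :=
        mem_idxs.2 ⟨1, by omega, rfl, c5⟩
      have := idxs_head_le (a :: l) j0 rest hE 1 h0
      rw [hj0k] at this
      omega
  have hk0kl : k0 < kl := by
    have hlt := idxs_head_lt_last (a :: l) j0 rest hidx_ne hE hlen1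
    rw [hj0k, hjlk] at hlt
    exact_mod_cast hlt
  have hklne : kl < (a :: l).length - 1 := by
    rcases Nat.lt_or_ge kl ((a :: l).length - 1) with h | h
    · exact h
    · exfalso
      have he : (a :: l)[kl]'hkllt = (a :: l)[(a :: l).length - 1]'(by omega) :=
        getElem_congr rfl (by omega) _
      rw [he, hanval] at hklval
      omega
  -- A stops its loop after max_i = k0 + 1 ≤ 2 iterations
  unfold maxIxE
  rw [hi0get, hilget, if_pos hlen1, if_pos (by omega :
    (k0 : Int) < ((a :: l).length : Int) - (kl : Int))]
  -- the truncated loop is at most mvE - a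
  have hub : loopE (a :: l) ((k0 : Int) + 1) ≤ mvE (a :: l) - a := by
    refine foldB_le _ _ _ ?_ 0 (by omega)
    intro i hi
    rw [PySem.List.mem_pyRange_one] at hi
    have hi0 : i = 0 := by omega
    subst hi0
    rcases Nat.lt_or_ge k0 1 with hk00 | hk00
    · exfalso; omega
    · have hk0eq : k0 = 1 := by omega
      subst hk0eq
      have hMl : mvE (a :: l) ∈ l := by
        rw [show (a :: l)[1]'hk0lt = l[0]'(by simpa using hk0lt) from rfl] at hk0val
        rw [← hk0val]
        exact List.getElem_mem _
      constructor
      · rw [wit_t1_zero a l hMl]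
      · rw [t2_eq_zero]
        have hmem_a : a ∈ (a :: l).take ((a :: l).length - 1) := by
          have : (a :: l).length - 1 = ((a :: l).length - 2) + 1 := by omega
          rw [this, List.take_succ_cons]
          exact List.mem_cons_self
        have h1 : mvE ((a :: l).take ((a :: l).length - 1)) ≤ mvE (a :: l) :=
          le_mvE (List.take_subset _ _ (mvE_mem (List.ne_nil_of_mem hmem_a)))
        have h2 : a ≤ mvE ((a :: l).take ((a :: l).length - 1)) := le_mvE hmem_a
        rw [abs_sub_comm, abs_of_nonneg (by omega)]
        omega
  rw [min_eq_right (le_of_lt hca)]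
  omega

-- ===== VERDICT (by name: the statement is the Claim_ definition above) =====
theorem execute_spec : Claim_unchanged_execute := by
  intro A _hdom hpre hD
  cases A with
  | nil => exact absurd rfl hpre
  | cons a l => exact main_eq a l hD

theorem execute_changed : Claim_changed_execute := by unfold Claim_changed_execute; decide

theorem execute_tight : Claim_exact_execute := by
  intro A _hdom hpre hD
  cases A with
  | nil => exact absurd rfl hpre
  | cons a l => exact main_ne a l hD
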